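-- pv_equiv track=rewrite | github.com/claudiofrancesconi/chipcoin | src/chipcoin/interfaces/cli.py | _operator_worst_status
-- ===== SOURCE A (Python) =====
-- def _operator_worst_status(statuses) -> str:
--     """Return the most severe operator status."""
--
--     rank = {"ok": 0, "warn": 1, "fail": 2}
--     worst = "ok"
--     for status in statuses:
--         value = str(status)
--         if rank.get(value, 2) > rank[worst]:
--             worst = value if value in rank else "fail"
--     return worst
-- ===== SOURCE B (Python) =====
-- def _operator_worst_status(statuses) -> str:
--     """Return the most severe operator status."""
--     vals = {str(s) for s in statuses}
--     known = {"ok", "warn", "fail"}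
--     if "fail" in vals or not vals <= known:
--         return "fail"
--     if "warn" in vals:
--         return "warn"
--     return "ok"
-- ===== Notes on version B (the rewrite author's own statement) =====
-- stated objective: simpler
-- what changed: Replaces the running-worst accumulator loop with one set of coerced statuses probed by short-circuit presence checks in descending severity ('fail' present or unknown value -> fail; 'warn' present -> warn; else ok).
import Mathlib
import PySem

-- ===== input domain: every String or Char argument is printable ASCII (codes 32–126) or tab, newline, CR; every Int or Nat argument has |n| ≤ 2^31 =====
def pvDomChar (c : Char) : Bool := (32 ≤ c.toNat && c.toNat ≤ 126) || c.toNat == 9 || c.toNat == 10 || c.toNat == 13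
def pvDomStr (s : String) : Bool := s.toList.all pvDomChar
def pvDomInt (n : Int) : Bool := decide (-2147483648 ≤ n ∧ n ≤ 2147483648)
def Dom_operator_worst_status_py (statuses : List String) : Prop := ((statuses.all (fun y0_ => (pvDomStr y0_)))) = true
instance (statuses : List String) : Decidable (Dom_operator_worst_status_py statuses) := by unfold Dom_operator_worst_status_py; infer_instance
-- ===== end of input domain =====

-- B replaces A's running-worst accumulator loop with a set of statuses probed by
-- short-circuit presence checks in descending severity (objective: simpler).


-- ===== PORT A =====
-- rank = {"ok": 0, "warn": 1, "fail": 2}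
def owsRank : PySem.Dict String Int :=
  PySem.Dict.ofList [("ok", 0), ("warn", 1), ("fail", 2)]

def operator_worst_status_py (statuses : List String) : String :=
  statuses.foldl (fun worst status =>
    let value := status  -- str(status) is the identity on String
    -- rank[worst]: worst is always a key of rank, so the default 0 is never used
    if owsRank.getD value 2 > owsRank.getD worst 0 then
      if owsRank.contains value then value else "fail"
    else worst) "ok"

-- ===== PORT B =====
def owsKnown : PySem.Set String := PySem.Set.ofList ["ok", "warn", "fail"]

def operator_worst_status_py_alt (statuses : List String) : String :=
  let vals : PySem.Set String := PySem.Set.ofList statuses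
  if PySem.Set.contains vals "fail" || !(PySem.Set.issubset vals owsKnown) then "fail"
  else if PySem.Set.contains vals "warn" then "warn"
  else "ok"

-- ===== PRECONDITION & SPEC =====
def Spec_operator_worst_status_py (statuses : List String) (out : String) : Prop := out = operator_worst_status_py_alt statuses
instance (statuses : List String) (out : String) : Decidable (Spec_operator_worst_status_py statuses out) := by unfold Spec_operator_worst_status_py; infer_instance

-- ===== CLAIM (what is proved, stated in full; the proofs are below) =====
def Claim_equal_operator_worst_status_py : Prop := ∀ (statuses : List String), Dom_operator_worst_status_py statuses → Spec_operator_worst_status_py statuses (operator_worst_status_py statuses)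

-- ===== LEMMAS AND PROOFS =====

-- A's loop step as a named function, for the lemmas below
def owsStep (worst status : String) : String :=
  if owsRank.getD status 2 > owsRank.getD worst 0 then
    if owsRank.contains status then status else "fail"
  else worst

lemma ows_foldl_eq (statuses : List String) :
    statuses.foldl (fun worst status =>
      if owsRank.getD status 2 > owsRank.getD worst 0 then
        if owsRank.contains status then status else "fail"
      else worst) "ok" = statuses.foldl owsStep "ok" := rfl

lemma owsRank_eq : owsRank = PySem.Dict.mk [("ok", 0), ("warn", 1), ("fail", 2)] := by decide

lemma rank_getD (s : String) (d : Int) :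
    owsRank.getD s d =
      if s = "ok" then 0 else if s = "warn" then 1 else if s = "fail" then 2 else d := by
  rw [owsRank_eq]
  by_cases h1 : s = "ok"
  · subst h1; rfl
  · by_cases h2 : s = "warn"
    · subst h2; simp [PySem.Dict.getD, PySem.Dict.get?, List.find?]
    · by_cases h3 : s = "fail"
      · subst h3; simp [PySem.Dict.getD, PySem.Dict.get?, List.find?]
      · have e1 : ("ok" == s) = false := beq_eq_false_iff_ne.mpr (Ne.symm h1)
        have e2 : ("warn" == s) = false := beq_eq_false_iff_ne.mpr (Ne.symm h2)
        have e3 : ("fail" == s) = false := beq_eq_false_iff_ne.mpr (Ne.symm h3)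
        simp [PySem.Dict.getD, PySem.Dict.get?, List.find?, e1, e2, e3, h1, h2, h3]

lemma rank_contains (s : String) :
    owsRank.contains s = (s == "ok" || s == "warn" || s == "fail") := by
  rw [owsRank_eq]
  by_cases h1 : s = "ok"
  · subst h1; rfl
  · by_cases h2 : s = "warn"
    · subst h2; rfl
    · by_cases h3 : s = "fail"
      · subst h3; rfl
      · have e1 : ("ok" == s) = false := beq_eq_false_iff_ne.mpr (Ne.symm h1)
        have e2 : ("warn" == s) = false := beq_eq_false_iff_ne.mpr (Ne.symm h2)
        have e3 : ("fail" == s) = false := beq_eq_false_iff_ne.mpr (Ne.symm h3)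
        simp [PySem.Dict.contains, e1, e2, e3, beq_eq_false_iff_ne, h1, h2, h3]

-- "bad" elements: anything other than "ok"/"warn", i.e. what forces the result to "fail"
def owsBad (s : String) : Bool := !(s == "ok" || s == "warn")

lemma owsStep_fail (x : String) : owsStep "fail" x = "fail" := by
  unfold owsStep
  rw [rank_getD, rank_getD]
  split_ifs <;> simp_all

lemma ows_foldl_fail (l : List String) : l.foldl owsStep "fail" = "fail" := by
  induction l with
  | nil => rfl
  | cons x xs ih => simp [List.foldl, owsStep_fail, ih]

lemma owsStep_warn (x : String) :
    owsStep "warn" x = if owsBad x then "fail" else "warn" := by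
  unfold owsStep owsBad
  rw [rank_getD, rank_getD, rank_contains]
  by_cases h1 : x = "ok" <;> by_cases h2 : x = "warn" <;> by_cases h3 : x = "fail" <;>
    simp_all

lemma ows_foldl_warn (l : List String) :
    l.foldl owsStep "warn" = if l.any owsBad then "fail" else "warn" := by
  induction l with
  | nil => rfl
  | cons x xs ih =>
    simp only [List.foldl, owsStep_warn, List.any_cons]
    by_cases hx : owsBad x = true
    · simp [hx, ows_foldl_fail]
    · simp [hx, ih]

lemma ows_foldl_ok (l : List String) :
    l.foldl owsStep "ok" =
      if l.any owsBad then "fail"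
      else if l.any (· == "warn") then "warn" else "ok" := by
  induction l with
  | nil => rfl
  | cons x xs ih =>
    simp only [List.foldl, List.any_cons]
    by_cases h1 : x = "ok"
    · have hstep : owsStep "ok" x = "ok" := by
        unfold owsStep; rw [rank_getD, rank_getD]; simp [h1]
      have hbad : owsBad x = false := by simp [owsBad, h1]
      have hw : (x == "warn") = false := by simp [h1]
      simp [hstep, hbad, hw, ih]
    · by_cases h2 : x = "warn"
      · have hstep : owsStep "ok" x = "warn" := by
          unfold owsStep; rw [rank_getD, rank_getD, rank_contains]; simp [h2]
        have hbad : owsBad x = false := by simp [owsBad, h2]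
        have hw : (x == "warn") = true := by simp [h2]
        simp [hstep, hbad, hw, ows_foldl_warn]
      · have hbad : owsBad x = true := by simp [owsBad, h1, h2]
        have hstep : owsStep "ok" x = "fail" := by
          unfold owsStep
          rw [rank_getD, rank_getD, rank_contains]
          by_cases h3 : x = "fail" <;> simp_all
        simp [hstep, hbad, ows_foldl_fail]

lemma set_contains_any (l : List String) (a : String) :
    PySem.Set.contains (PySem.Set.ofList l) a = l.any (· == a) := by
  by_cases h : a ∈ l
  · have h1 : PySem.Set.contains (PySem.Set.ofList l) a = true :=
      (PySem.Set.contains_iff _ _).mpr ((PySem.Set.mem_ofList _ _).mpr h)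
    have h2 : l.any (· == a) = true := List.any_eq_true.mpr ⟨a, h, by simp⟩
    rw [h1, h2]
  · have h1 : PySem.Set.contains (PySem.Set.ofList l) a = false := by
      rw [← Bool.not_eq_true]
      intro hc
      exact h ((PySem.Set.mem_ofList _ _).mp ((PySem.Set.contains_iff _ _).mp hc))
    have h2 : l.any (· == a) = false := by
      rw [← Bool.not_eq_true, List.any_eq_true]
      rintro ⟨x, hx, hxa⟩
      exact h (beq_iff_eq.mp hxa ▸ hx)
    rw [h1, h2]

lemma alt_char (l : List String) :
    operator_worst_status_py_alt l =
      if l.any owsBad then "fail"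
      else if l.any (· == "warn") then "warn" else "ok" := by
  have hsub : PySem.Set.issubset (PySem.Set.ofList l) owsKnown =
      !(l.any (fun s => !(s == "ok" || s == "warn" || s == "fail"))) := by
    rcases h : l.any (fun s => !(s == "ok" || s == "warn" || s == "fail")) with _ | _
    · have : PySem.Set.issubset (PySem.Set.ofList l) owsKnown = true := by
        rw [PySem.Set.issubset_iff]
        intro x hx
        have hx' := List.any_eq_false.mp h x ((PySem.Set.mem_ofList _ _).mp hx)
        simp at hx'
        simp only [owsKnown, PySem.Set.mem_ofList]
        by_cases e1 : x = "ok"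
        · simp [e1]
        · by_cases e2 : x = "warn"
          · simp [e2]
          · simp [hx' e1 e2]
      rw [this]; rfl
    · obtain ⟨x, hx, hxb⟩ := List.any_eq_true.mp h
      have : PySem.Set.issubset (PySem.Set.ofList l) owsKnown = false := by
        rw [← Bool.not_eq_true]
        intro hc
        have hm := (PySem.Set.issubset_iff _ _).mp hc x ((PySem.Set.mem_ofList _ _).mpr hx)
        simp only [owsKnown, PySem.Set.mem_ofList] at hm
        simp only [Bool.not_eq_true', Bool.or_eq_false_iff, beq_eq_false_iff_ne, ne_eq] at hxb
        simp only [List.mem_cons] at hm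
        tauto
      rw [this]; rfl
  unfold operator_worst_status_py_alt
  simp only [set_contains_any, hsub, Bool.not_not]
  by_cases hb : l.any owsBad = true
  · have h1 : (l.any (· == "fail") || l.any (fun s => !(s == "ok" || s == "warn" || s == "fail"))) = true := by
      obtain ⟨x, hx, hxb⟩ := List.any_eq_true.mp hb
      unfold owsBad at hxb
      simp only [Bool.not_eq_true', Bool.or_eq_false_iff, beq_eq_false_iff_ne, ne_eq] at hxb
      obtain ⟨hxo, hxw⟩ := hxb
      rw [Bool.or_eq_true]
      by_cases hf : x = "fail"
      · exact Or.inl (List.any_eq_true.mpr ⟨x, hx, by simp [hf]⟩)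
      · exact Or.inr (List.any_eq_true.mpr ⟨x, hx, by simp [hxo, hxw, hf]⟩)
    rw [h1, hb]
  · have hno : ∀ x ∈ l, x = "ok" ∨ x = "warn" := by
      intro x hx
      have hbf : l.any owsBad = false := by simpa using hb
      have := List.any_eq_false.mp hbf x hx
      simp [owsBad] at this
      tauto
    have h1 : l.any (· == "fail") = false := by
      rw [← Bool.not_eq_true, List.any_eq_true]
      rintro ⟨x, hx, hxf⟩
      rcases hno x hx with rfl | rfl <;> simp at hxf
    have h2 : l.any (fun s => !(s == "ok" || s == "warn" || s == "fail")) = false := by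
      rw [← Bool.not_eq_true, List.any_eq_true]
      rintro ⟨x, hx, hxb⟩
      rcases hno x hx with rfl | rfl <;> simp at hxb
    have hb' : l.any owsBad = false := by simpa using hb
    rw [h1, h2, hb']
    simp

-- ===== VERDICT (by name: the statement is the Claim_ definition above) =====
theorem operator_worst_status_py_spec : Claim_equal_operator_worst_status_py := by
  intro statuses _
  unfold Spec_operator_worst_status_py operator_worst_status_py
  rw [ows_foldl_eq, ows_foldl_ok, alt_char]
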